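-- pv_equiv track=rewrite | github.com/Yeongjae-Kong/codetree-TILs | 240412/루돌프의 반란/rudolph-rebellion.py | shortest_S
-- ===== SOURCE A (Python) =====
-- def shortest_S(R, S): # 거리가 짧은 index (혹은 index arr) return
--     dist_arr = []
--     index_arr = [] # 중복 확인용
--     for i in range(len(S)):
--         if S[i][3] != -1:
--             dist = (R[0] - S[i][1]+1)**2 + (R[1] - S[i][2]+1)**2
--             if len(dist_arr) < 1:
--                 dist_arr.append(dist)
--             if min(dist_arr) > dist:
--                 dist_arr.append(dist)
--                 index_arr = []
--                 index_arr.append(i)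
--             elif min(dist_arr) == dist:
--                 index_arr.append(i)
--     return index_arr
-- ===== SOURCE B (Python) =====
-- def shortest_S(R, S):
--     # staged passes: (1) build (distance, index) pairs for valid rows,
--     # (2) take the minimum distance, (3) collect the indices that attain it
--     dists = [((R[0] - row[1] + 1) ** 2 + (R[1] - row[2] + 1) ** 2, i)
--              for i, row in enumerate(S) if row[3] != -1]
--     if not dists:
--         return []
--     m = min(d for d, _ in dists)
--     return [i for d, i in dists if d == m]
-- ===== Notes on version B (the rewrite author's own statement) =====
-- stated objective: alternative
-- what changed: Replaces A's online fold (growing dist_arr rescanned with min() while resetting/extending the tied-index list in one loop) by three staged passes: build (distance,index) pairs of valid rows, take the minimum distance, then filter the indices attaining it.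
import Mathlib
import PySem

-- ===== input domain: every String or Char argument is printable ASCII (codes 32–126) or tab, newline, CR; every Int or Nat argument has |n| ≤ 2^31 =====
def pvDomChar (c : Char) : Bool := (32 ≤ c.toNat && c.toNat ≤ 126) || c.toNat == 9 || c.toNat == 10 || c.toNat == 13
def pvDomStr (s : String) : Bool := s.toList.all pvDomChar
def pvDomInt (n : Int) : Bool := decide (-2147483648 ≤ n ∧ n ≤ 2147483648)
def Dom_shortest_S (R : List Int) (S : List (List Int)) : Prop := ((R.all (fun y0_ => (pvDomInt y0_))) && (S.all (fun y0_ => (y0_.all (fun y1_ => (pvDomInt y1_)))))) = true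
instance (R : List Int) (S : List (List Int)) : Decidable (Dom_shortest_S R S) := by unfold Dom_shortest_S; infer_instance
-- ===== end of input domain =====

-- B replaces A's online one-loop fold by three staged passes (build (dist,index) pairs,
-- take the minimum, filter the indices attaining it); alternative structure, no speed claim.

-- ===== PORT A =====
-- loop body of A: state = (dist_arr, index_arr); iteration over (i, S[i])
def stepA (R : List Int) (st : List Int × List Int) (p : Int × List Int) : List Int × List Int :=
  if PySem.List.pyGetD p.2 3 0 ≠ -1 then
    let dist := (PySem.List.pyGetD R 0 0 - PySem.List.pyGetD p.2 1 0 + 1) ^ 2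
              + (PySem.List.pyGetD R 1 0 - PySem.List.pyGetD p.2 2 0 + 1) ^ 2
    let distArr := if st.1.length < 1 then st.1 ++ [dist] else st.1
    if (PySem.List.min? distArr (fun x => x)).getD 0 > dist then
      (distArr ++ [dist], [p.1])
    else if (PySem.List.min? distArr (fun x => x)).getD 0 = dist then
      (distArr, st.2 ++ [p.1])
    else (distArr, st.2)
  else st

def shortest_S (R : List Int) (S : List (List Int)) : List Int :=
  ((PySem.List.enumerate S 0).foldl (stepA R) ([], [])).2

-- ===== PORT B =====
-- stage 1 of Source B: the list comprehension building (distance, index) pairs of valid rows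
def pvRow (R : List Int) (p : Int × List Int) : Option (Int × Int) :=
  if PySem.List.pyGetD p.2 3 0 ≠ -1 then
    some ((PySem.List.pyGetD R 0 0 - PySem.List.pyGetD p.2 1 0 + 1) ^ 2
        + (PySem.List.pyGetD R 1 0 - PySem.List.pyGetD p.2 2 0 + 1) ^ 2, p.1)
  else none

def pvPairs (R : List Int) (S : List (List Int)) : List (Int × Int) :=
  (PySem.List.enumerate S 0).filterMap (pvRow R)

-- stages 2 and 3: early return on empty, min of the distances, filter the tied indices
def shortest_S_alt (R : List Int) (S : List (List Int)) : List Int :=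
  let dists := pvPairs R S
  match PySem.List.min? (dists.map Prod.fst) (fun x => x) with
  | none => []
  | some m => (dists.filter (fun q => q.1 == m)).map Prod.snd

-- ===== PRECONDITION & SPEC =====
-- Pre_: Python A raises IndexError when some row of S is shorter than 4, or when some row
-- is valid (row[3] != -1) and R is shorter than 2; exactly those inputs are excluded.
def Pre_shortest_S (R : List Int) (S : List (List Int)) : Prop :=
  (∀ row ∈ S, 4 ≤ row.length) ∧ ((∃ row ∈ S, row.getD 3 0 ≠ -1) → 2 ≤ R.length)
instance (R : List Int) (S : List (List Int)) : Decidable (Pre_shortest_S R S) := by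
  unfold Pre_shortest_S; infer_instance
def pvWitness_shortest_S : List Int × List (List Int) :=
  ([0, 0], [[9, 1, 1, 5], [9, 2, 2, -1], [9, 1, 1, 7]])
def Spec_shortest_S (R : List Int) (S : List (List Int)) (out : List Int) : Prop := out = shortest_S_alt R S
instance (R : List Int) (S : List (List Int)) (out : List Int) : Decidable (Spec_shortest_S R S out) := by unfold Spec_shortest_S; infer_instance

-- ===== CLAIM (what is proved, stated in full; the proofs are below) =====
def Claim_equal_shortest_S : Prop := ∀ (R : List Int) (S : List (List Int)), Dom_shortest_S R S → Pre_shortest_S R S → Spec_shortest_S R S (shortest_S R S)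

-- ===== LEMMAS AND PROOFS =====

-- proof-side loop body equivalent to A's, but acting on the precomputed (dist, index) pairs
def stepP (st : Option Int × List Int) (q : Int × Int) : Option Int × List Int :=
  match st.1 with
  | none => (some q.1, [q.2])
  | some b =>
    if q.1 < b then (some q.1, [q.2])
    else if q.1 = b then (some b, st.2 ++ [q.2])
    else st

-- invariant tying A's dist_arr to the scalar minimum
def pvInv (distArr : List Int) (best : Option Int) : Prop :=
  match best with
  | none => distArr = []
  | some m => m ∈ distArr ∧ ∀ x ∈ distArr, m ≤ x

theorem min_val_of_inv (distArr : List Int) (m : Int) (h : pvInv distArr (some m)) :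
    (PySem.List.min? distArr (fun x => x)).getD 0 = m := by
  obtain ⟨hm, hle⟩ := h
  cases hmin : PySem.List.min? distArr (fun x => x) with
  | none =>
    have := (PySem.List.min?_eq_none_iff (xs := distArr) (key := fun x => x)).mp hmin
    simp [this] at hm
  | some m' =>
    have hmem := PySem.List.min?_mem hmin
    have h1 := PySem.List.min?_isMin hmin m hm
    have h2 := hle m' hmem
    simp at h1
    simp
    omega

-- A's fold equals the stepP fold over the precomputed pairs
theorem fold_agree (R : List Int) (L : List (Int × List Int))
    (distArr indexArr : List Int) (best : Option Int)
    (hinv : pvInv distArr best) (hemp : distArr = [] → indexArr = []) :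
    (L.foldl (stepA R) (distArr, indexArr)).2
      = ((L.filterMap (pvRow R)).foldl stepP (best, indexArr)).2 := by
  induction L generalizing distArr indexArr best with
  | nil => simp
  | cons p L ih =>
    simp only [List.foldl_cons, List.filterMap_cons]
    by_cases hv : PySem.List.pyGetD p.2 3 0 = -1
    · rw [show stepA R (distArr, indexArr) p = (distArr, indexArr) by simp [stepA, hv],
          show pvRow R p = none by simp [pvRow, hv]]
      exact ih distArr indexArr best hinv hemp
    · set d := (PySem.List.pyGetD R 0 0 - PySem.List.pyGetD p.2 1 0 + 1) ^ 2
             + (PySem.List.pyGetD R 1 0 - PySem.List.pyGetD p.2 2 0 + 1) ^ 2 with hd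
      rw [show pvRow R p = some (d, p.1) by simp [pvRow, hv, ← hd]]
      simp only [List.foldl_cons]
      cases best with
      | none =>
        have hnil : distArr = [] := hinv
        have hinil : indexArr = [] := hemp hnil
        subst hnil; subst hinil
        rw [show stepA R ([], []) p = ([d], [p.1]) by
              simp [stepA, hv, ← hd, PySem.List.min?],
            show stepP (none, ([] : List Int)) (d, p.1) = (some d, [p.1]) by simp [stepP]]
        exact ih [d] [p.1] (some d) (by simp [pvInv]) (by simp)
      | some m =>
        have hne : distArr ≠ [] := by
          intro h; simp [pvInv, h] at hinv
        have hlen : ¬ distArr.length < 1 := by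
          cases distArr with
          | nil => exact absurd rfl hne
          | cons a t => simp
        have hmin : (PySem.List.min? distArr (fun x => x)).getD 0 = m :=
          min_val_of_inv distArr m hinv
        obtain ⟨hm, hle⟩ := hinv
        by_cases hlt : d < m
        · rw [show stepA R (distArr, indexArr) p = (distArr ++ [d], [p.1]) by
                simp only [stepA, if_pos hv]
                rw [if_neg hlen, hmin, if_pos (by omega : m > d)],
              show stepP (some m, indexArr) (d, p.1) = (some d, [p.1]) by
                simp only [stepP]; rw [if_pos hlt]]
          refine ih _ _ _ ⟨by simp, ?_⟩ (by simp)
          intro x hx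
          rcases List.mem_append.mp hx with h | h
          · have := hle x h; omega
          · simp at h; omega
        · by_cases heq : d = m
          · rw [show stepA R (distArr, indexArr) p = (distArr, indexArr ++ [p.1]) by
                  simp only [stepA, if_pos hv]
                  rw [if_neg hlen, hmin, if_neg (by omega : ¬ m > d), if_pos heq.symm],
                show stepP (some m, indexArr) (d, p.1) = (some m, indexArr ++ [p.1]) by
                  simp only [stepP]; rw [if_neg hlt, if_pos heq]]
            exact ih _ _ _ ⟨hm, hle⟩ (by intro h; exact absurd h hne)
          · rw [show stepA R (distArr, indexArr) p = (distArr, indexArr) by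
                  simp only [stepA, if_pos hv]
                  rw [if_neg hlen, hmin, if_neg (by omega : ¬ m > d),
                      if_neg (fun h => heq h.symm)],
                show stepP (some m, indexArr) (d, p.1) = (some m, indexArr) by
                  simp only [stepP]; rw [if_neg hlt, if_neg heq]]
            exact ih _ _ _ ⟨hm, hle⟩ (by intro h; exact absurd h hne)

-- the running minimum of the pair distances
def pvMin (ps : List (Int × Int)) (m : Int) : Int := ps.foldl (fun a q => min a q.1) m

theorem pvMin_le (ps : List (Int × Int)) (m : Int) :
    pvMin ps m ≤ m ∧ ∀ q ∈ ps, pvMin ps m ≤ q.1 := by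
  induction ps generalizing m with
  | nil => simp [pvMin]
  | cons q ps ih =>
    have h := ih (min m q.1)
    refine ⟨le_trans h.1 (min_le_left _ _), ?_⟩
    intro r hr
    rcases List.mem_cons.mp hr with h1 | h1
    · subst h1; exact le_trans h.1 (min_le_right _ _)
    · exact h.2 r h1

-- the stepP fold from (some m, acc) computes the staged min-then-filter result
theorem stage (ps : List (Int × Int)) (m : Int) (acc : List Int) :
    (ps.foldl stepP (some m, acc)).2
      = (if pvMin ps m = m then acc else [])
        ++ (ps.filter (fun q => q.1 == pvMin ps m)).map Prod.snd := by
  induction ps generalizing m acc with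
  | nil => simp [pvMin]
  | cons q ps ih =>
    have hb := pvMin_le ps (min m q.1)
    have hbm : pvMin (q :: ps) m = pvMin ps (min m q.1) := rfl
    simp only [List.foldl_cons, hbm, List.filter_cons]
    rcases lt_trichotomy q.1 m with hlt | heq | hgt
    · rw [show stepP (some m, acc) q = (some q.1, [q.2]) by
            simp only [stepP]; rw [if_pos hlt]]
      have hmm : min m q.1 = q.1 := min_eq_right (le_of_lt hlt)
      rw [hmm] at hb ⊢
      have hne : pvMin ps q.1 ≠ m := by omega
      rw [if_neg hne, ih]
      by_cases hqb : pvMin ps q.1 = q.1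
      · rw [if_pos hqb, if_pos (by simp [hqb])]
        simp
      · rw [if_neg hqb, if_neg (by simp; omega)]
    · subst heq
      rw [show stepP (some q.1, acc) q = (some q.1, acc ++ [q.2]) by simp [stepP]]
      have hmm : min q.1 q.1 = q.1 := min_self _
      rw [hmm] at hb ⊢
      rw [ih]
      by_cases hqb : pvMin ps q.1 = q.1
      · rw [if_pos hqb, if_pos hqb, if_pos (by simp [hqb])]
        simp
      · rw [if_neg hqb, if_neg hqb, if_neg (by simp; omega)]
    · rw [show stepP (some m, acc) q = (some m, acc) by
            simp only [stepP]
            rw [if_neg (by omega : ¬ q.1 < m), if_neg (by omega : ¬ q.1 = m)]]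
      have hmm : min m q.1 = m := min_eq_left (le_of_lt hgt)
      rw [hmm] at hb ⊢
      have h1 : pvMin ps m ≤ m := hb.1
      have hne : (q.1 == pvMin ps m) = false := by
        simp only [beq_eq_false_iff_ne, ne_eq]; omega
      rw [ih, hne]
      simp

-- ===== VERDICT (by name: the statement is the Claim_ definition above) =====
theorem shortest_S_spec : Claim_equal_shortest_S := by
  intro R S _ _
  unfold Spec_shortest_S shortest_S shortest_S_alt
  rw [fold_agree R _ [] [] none (by simp [pvInv]) (fun _ => rfl)]
  show ((pvPairs R S).foldl stepP (none, [])).2 = _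
  cases hps : pvPairs R S with
  | nil => simp [PySem.List.min?]
  | cons q ps =>
    simp only [List.map_cons, PySem.List.min?_id_cons, List.foldl_cons,
      show stepP (none, ([] : List Int)) q = (some q.1, [q.2]) from rfl]
    rw [stage, List.filter_cons]
    have hmap : (ps.map Prod.fst).foldl min q.1 = pvMin ps q.1 := by
      simp [pvMin, List.foldl_map]
    rw [hmap]
    by_cases hqb : pvMin ps q.1 = q.1
    · rw [if_pos hqb, if_pos (by simp [hqb])]
      simp
    · have := (pvMin_le ps q.1).1
      rw [if_neg hqb, if_neg (by simp; omega)]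
      simp
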